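-- pv_equiv track=rewrite | github.com/brunocuevas/a2md | a2md/utils.py | create_all2all_topology
-- ===== SOURCE A (Python) =====
-- def create_all2all_topology(n_items):
--     topo_array = []
--     for i in range(n_items):
--         topo_array.append([])
--     for i in range(n_items):
--         for j in range(n_items):
--             if i != j :
--                 topo_array[i].append(j)
--     return topo_array
-- ===== SOURCE B (Python) =====
-- def create_all2all_topology(n_items):
--     # Incremental construction: when item k is added, it becomes a neighbour
--     # of every previously added item, and its own row is all previous items.
--     topo = []
--     for k in range(n_items):
--         for row in topo:
--             row.append(k)
--         topo.append(list(range(k)))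
--     return topo
-- ===== Notes on version B (the rewrite author's own statement) =====
-- stated objective: alternative
-- what changed: B builds the topology incrementally: for each new item k it appends k to every already-built row and adds k's own row as the list of all previous items, replacing A's pre-allocation pass plus nested i/j loops with an i!=j test.
import Mathlib
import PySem

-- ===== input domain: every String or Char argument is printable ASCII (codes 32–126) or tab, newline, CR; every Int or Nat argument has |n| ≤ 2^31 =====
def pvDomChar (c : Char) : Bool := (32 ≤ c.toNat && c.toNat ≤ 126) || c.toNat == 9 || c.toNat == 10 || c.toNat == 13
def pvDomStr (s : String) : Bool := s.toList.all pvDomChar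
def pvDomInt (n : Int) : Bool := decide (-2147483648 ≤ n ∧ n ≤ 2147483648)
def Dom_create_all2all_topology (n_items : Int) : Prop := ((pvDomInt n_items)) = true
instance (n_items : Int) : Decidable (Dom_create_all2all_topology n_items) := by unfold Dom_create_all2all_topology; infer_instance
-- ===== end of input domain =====

-- B builds the topology incrementally (each new item k is appended to every existing row and
-- gets the row of all previous items), instead of A's pre-allocation pass plus nested i/j loops.

-- ===== PORT A =====
def create_all2all_topology (n_items : Int) : List (List Int) :=
  let topo_array : List (List Int) :=
    (PySem.List.pyRange 0 n_items 1).foldl (fun acc _ => acc ++ [[]]) []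
  (PySem.List.pyRange 0 n_items 1).foldl (fun arr i =>
    (PySem.List.pyRange 0 n_items 1).foldl (fun arr j =>
      if i ≠ j then arr.set i.toNat ((arr.getD i.toNat []) ++ [j]) else arr) arr) topo_array

-- ===== PORT B =====
def create_all2all_topology_alt (n_items : Int) : List (List Int) :=
  (PySem.List.pyRange 0 n_items 1).foldl
    (fun topo k => topo.map (fun row => row ++ [k]) ++ [PySem.List.pyRange 0 k 1]) []

-- ===== PRECONDITION & SPEC =====
def Spec_create_all2all_topology (n_items : Int) (out : List (List Int)) : Prop := out = create_all2all_topology_alt n_items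
instance (n_items : Int) (out : List (List Int)) : Decidable (Spec_create_all2all_topology n_items out) := by unfold Spec_create_all2all_topology; infer_instance

-- ===== CLAIM (what is proved, stated in full; the proofs are below) =====
def Claim_equal_create_all2all_topology : Prop := ∀ (n_items : Int), Dom_create_all2all_topology n_items → Spec_create_all2all_topology n_items (create_all2all_topology n_items)

-- ===== LEMMAS AND PROOFS =====

-- the row both programs compute for index i (indices below i, then those above i up to n)
def pvRow (n i : Int) : List Int := PySem.List.pyRange 0 i 1 ++ PySem.List.pyRange (i + 1) n 1

-- A's first loop builds a list of empty rows
theorem pv_alloc (l : List Int) (init : List (List Int)) :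
    l.foldl (fun acc _ => acc ++ [[]]) init = init ++ List.replicate l.length ([] : List Int) := by
  induction l generalizing init with
  | nil => simp
  | cons x xs ih =>
    rw [List.foldl_cons, ih, List.append_assoc]
    simp [List.replicate_succ]

-- A's inner j-loop appends exactly the j ≠ i to slot i
theorem pv_inner (i : Int) (js : List Int) (arr : List (List Int)) (h : i.toNat < arr.length) :
    js.foldl (fun arr j => if i ≠ j then arr.set i.toNat ((arr.getD i.toNat []) ++ [j]) else arr) arr
      = arr.set i.toNat ((arr.getD i.toNat []) ++ js.filter (fun j => j ≠ i)) := by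
  induction js generalizing arr with
  | nil =>
    rw [List.getD, List.getElem?_eq_getElem h]
    simp [List.set_getElem_self]
  | cons j js ih =>
    by_cases hj : i = j
    · subst hj
      rw [List.foldl_cons, if_neg (by simp), ih arr h, List.filter_cons]
      simp
    · rw [List.foldl_cons, if_pos (by exact hj), ih _ (by simpa using h)]
      have hget : (arr.set i.toNat ((arr.getD i.toNat []) ++ [j])).getD i.toNat []
          = (arr.getD i.toNat []) ++ [j] := by
        simp [List.getD, h]
      rw [hget, List.set_set, List.filter_cons]
      simp [Ne.symm hj]

-- filtering i out of range(n) leaves range(i) ++ range(i+1, n)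
theorem pv_filter (n i : Int) (h0 : 0 ≤ i) (h1 : i < n) :
    (PySem.List.pyRange 0 n 1).filter (fun j => j ≠ i) = pvRow n i := by
  rw [PySem.List.pyRange_one_append 0 i n h0 h1.le,
      PySem.List.pyRange_one_append i (i+1) n (by omega) (by omega),
      PySem.List.pyRange_one_singleton]
  rw [List.filter_append, List.filter_append]
  have ha : (PySem.List.pyRange 0 i 1).filter (fun j => j ≠ i) = PySem.List.pyRange 0 i 1 := by
    apply List.filter_eq_self.2
    intro x hx
    have := (PySem.List.mem_pyRange_one).1 hx
    simp; omega
  have hb : ([i] : List Int).filter (fun j => j ≠ i) = [] := by simp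
  have hc : (PySem.List.pyRange (i+1) n 1).filter (fun j => j ≠ i) = PySem.List.pyRange (i+1) n 1 := by
    apply List.filter_eq_self.2
    intro x hx
    have := (PySem.List.mem_pyRange_one).1 hx
    simp; omega
  rw [ha, hb, hc]; simp [pvRow]

-- A's outer-loop invariant
theorem pv_outer (n : Int) (k : Nat) : ∀ (m : Int), 0 ≤ m → m + k = n →
    (PySem.List.pyRange m n 1).foldl (fun arr i =>
      (PySem.List.pyRange 0 n 1).foldl (fun arr j =>
        if i ≠ j then arr.set i.toNat ((arr.getD i.toNat []) ++ [j]) else arr) arr)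
      ((PySem.List.pyRange 0 m 1).map (pvRow n) ++ List.replicate k ([] : List Int))
    = (PySem.List.pyRange 0 n 1).map (pvRow n) := by
  induction k with
  | zero =>
    intro m hm hmk
    have hmn : m = n := by omega
    subst hmn
    rw [PySem.List.pyRange_one_eq_nil le_rfl]
    simp
  | succ k ih =>
    intro m hm hmk
    have hmn : m < n := by omega
    rw [PySem.List.pyRange_one_cons hmn]
    simp only [List.foldl]
    have hlen : ((PySem.List.pyRange 0 m 1).map (pvRow n)).length = m.toNat := by
      simp [PySem.List.length_pyRange_one]
    have harrlen : m.toNat < ((PySem.List.pyRange 0 m 1).map (pvRow n) ++ List.replicate (k+1) ([] : List Int)).length := by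
      simp [hlen]
    rw [pv_inner m _ _ harrlen]
    have hget : ((PySem.List.pyRange 0 m 1).map (pvRow n) ++ List.replicate (k+1) ([] : List Int)).getD m.toNat [] = [] := by
      rw [List.getD, List.getElem?_append_right (by omega)]
      simp [hlen]
    have hset : ((PySem.List.pyRange 0 m 1).map (pvRow n) ++ List.replicate (k+1) ([] : List Int)).set m.toNat (pvRow n m)
        = (PySem.List.pyRange 0 (m+1) 1).map (pvRow n) ++ List.replicate k ([] : List Int) := by
      rw [List.set_append_right _ _ (by omega), PySem.List.pyRange_one_succ_right (by omega)]
      simp [hlen, List.replicate_succ]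
    rw [hget, List.nil_append, pv_filter n m hm hmn, hset]
    exact ih (m+1) (by omega) (by omega)

-- extending a row of the (m)-topology by m gives the corresponding row of the (m+1)-topology
theorem pv_row_grow (m i : Int) (h1 : i < m) :
    pvRow m i ++ [m] = pvRow (m + 1) i := by
  unfold pvRow
  rw [List.append_assoc, PySem.List.pyRange_one_succ_right (by omega)]

-- B's fold invariant: the partial topology after processing 0..m-1 is the full m-topology
theorem pv_b_invariant (n : Int) (k : Nat) : ∀ (m : Int), 0 ≤ m → m + k = n →
    (PySem.List.pyRange m n 1).foldl
      (fun topo j => topo.map (fun row => row ++ [j]) ++ [PySem.List.pyRange 0 j 1])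
      ((PySem.List.pyRange 0 m 1).map (pvRow m))
    = (PySem.List.pyRange 0 n 1).map (pvRow n) := by
  induction k with
  | zero =>
    intro m hm hmk
    have hmn : m = n := by omega
    subst hmn
    rw [PySem.List.pyRange_one_eq_nil le_rfl]
    simp
  | succ k ih =>
    intro m hm hmn'
    have hmn : m < n := by omega
    rw [PySem.List.pyRange_one_cons hmn]
    simp only [List.foldl]
    have hmap : ((PySem.List.pyRange 0 m 1).map (pvRow m)).map (fun row => row ++ [m])
        = (PySem.List.pyRange 0 m 1).map (pvRow (m+1)) := by
      rw [List.map_map]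
      apply List.map_congr_left
      intro i hi
      have := (PySem.List.mem_pyRange_one).1 hi
      exact pv_row_grow m i (by omega)
    have hnew : [PySem.List.pyRange 0 m 1] = [pvRow (m+1) m] := by
      unfold pvRow
      rw [PySem.List.pyRange_one_eq_nil (le_refl (m+1))]
      simp
    rw [hmap, hnew,
        show (PySem.List.pyRange 0 m 1).map (pvRow (m+1)) ++ [pvRow (m+1) m]
          = (PySem.List.pyRange 0 (m+1) 1).map (pvRow (m+1)) by
            rw [PySem.List.pyRange_one_succ_right (by omega)]; simp]
    exact ih (m+1) (by omega) (by omega)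

-- B computes the same rows
theorem pv_b_char (n : Int) :
    create_all2all_topology_alt n = (PySem.List.pyRange 0 n 1).map (pvRow n) := by
  unfold create_all2all_topology_alt
  by_cases hn : n ≤ 0
  · rw [PySem.List.pyRange_one_eq_nil (by omega)]
    simp
  · rw [not_le] at hn
    have h0 : ((PySem.List.pyRange 0 (0:Int) 1).map (pvRow 0)) = ([] : List (List Int)) := by
      rw [PySem.List.pyRange_one_eq_nil le_rfl]; simp
    rw [← h0]
    exact pv_b_invariant n n.toNat 0 le_rfl (by omega)

-- ===== VERDICT (by name: the statement is the Claim_ definition above) =====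
theorem create_all2all_topology_spec : Claim_equal_create_all2all_topology := by
  intro n _
  unfold Spec_create_all2all_topology create_all2all_topology
  rw [pv_b_char]
  by_cases hn : n ≤ 0
  · rw [PySem.List.pyRange_one_eq_nil (by omega)]
    simp
  · rw [not_le] at hn
    rw [pv_alloc]
    have hlen : (PySem.List.pyRange 0 n 1).length = n.toNat := by
      simp [PySem.List.length_pyRange_one]
    rw [hlen, show ((List.replicate n.toNat ([] : List Int)) : List (List Int))
        = (PySem.List.pyRange 0 0 1).map (pvRow n) ++ List.replicate n.toNat [] by
          simp [PySem.List.pyRange_one_eq_nil (le_refl (0:Int))]]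
    exact pv_outer n n.toNat 0 le_rfl (by omega)
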